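-- pv_equiv track=rewrite | github.com/SuperInstance/forgemaster | flux-hardware/hdc/flux_hdc.py | majority_bundle
-- ===== SOURCE A (Python) =====
-- def majority_bundle(vectors):
--     n = len(vectors)
--     if n == 0:
--         return None
--     if n == 1:
--         return list(vectors[0])
--     result = []
--     for i in range(len(vectors[0])):
--         count = sum(v[i] for v in vectors)
--         result.append(1 if count > n / 2 else 0)
--     return result
-- ===== SOURCE B (Python) =====
-- def _vsum(vs):
--     if len(vs) == 1:
--         return list(vs[0])
--     mid = len(vs) // 2
--     return [a + b for a, b in zip(_vsum(vs[:mid]), _vsum(vs[mid:]))]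
--
--
-- def majority_bundle(vectors):
--     n = len(vectors)
--     if n == 0:
--         return None
--     if n == 1:
--         return list(vectors[0])
--     return [1 if 2 * c > n else 0 for c in _vsum(vectors)]
-- ===== Notes on version B (the rewrite author's own statement) =====
-- stated objective: alternative
-- what changed: Replaces A's per-dimension rescans (one inner generator-sum per output index) by a divide-and-conquer tree reduction: recursively split the vector list in half, elementwise-add the two halves' partial sums via zip, then threshold once with the integer test 2*c > n in place of the float c > n/2.
import Mathlib
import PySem

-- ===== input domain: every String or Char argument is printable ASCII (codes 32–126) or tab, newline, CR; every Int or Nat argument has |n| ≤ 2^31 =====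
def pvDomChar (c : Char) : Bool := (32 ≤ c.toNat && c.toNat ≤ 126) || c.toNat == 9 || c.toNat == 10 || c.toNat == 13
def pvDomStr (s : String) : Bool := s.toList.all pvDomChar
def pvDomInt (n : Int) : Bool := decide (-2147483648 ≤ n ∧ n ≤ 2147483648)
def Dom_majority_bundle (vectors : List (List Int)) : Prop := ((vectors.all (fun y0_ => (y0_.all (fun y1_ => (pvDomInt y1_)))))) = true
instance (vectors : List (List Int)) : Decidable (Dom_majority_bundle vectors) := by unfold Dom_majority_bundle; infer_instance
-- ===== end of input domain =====

-- B replaces A's per-dimension rescans of the vector list by a divide-and-conquer tree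
-- reduction (split in half, elementwise-add the halves' sums, threshold once);
-- objective: alternative — a genuinely different decomposition of the same cost.
-- The Python test 'count > n / 2' is ported as '2 * count > n', exact for integers.

-- ===== PORT A =====
def majority_bundle (vectors : List (List Int)) : Option (List Int) :=
  let n := vectors.length
  if n = 0 then none
  else if n = 1 then some (vectors.headD [])
  else
    some ((PySem.List.pyRange 0 ((vectors.headD []).length) 1).foldl
      (fun result i =>
        result ++ [if 2 * (vectors.foldl (fun s v => s + PySem.List.pyGetD v i 0) 0) > (n : Int) then 1 else 0])
      [])

-- ===== PORT B =====
-- _vsum: recursive halving reduction, zip-adding the two halves' elementwise sums.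
def pvVSum (vs : List (List Int)) : List Int :=
  match vs with
  | [] => []
  | [v] => v
  | a :: b :: rest =>
    let vs' := a :: b :: rest
    let mid := vs'.length / 2
    (pvVSum (vs'.take mid)).zipWith (fun x y => x + y) (pvVSum (vs'.drop mid))
termination_by vs.length
decreasing_by
  · simp [List.length_take]; omega
  · simp [List.length_drop]; omega

def majority_bundle_alt (vectors : List (List Int)) : Option (List Int) :=
  let n := vectors.length
  if n = 0 then none
  else if n = 1 then some (vectors.headD [])
  else some ((pvVSum vectors).map (fun c => if 2 * c > (n : Int) then 1 else 0))

-- ===== PRECONDITION & SPEC =====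
-- Pre_ excludes exactly the ragged inputs on which A raises IndexError
-- (some vector shorter than vectors[0], with at least two vectors).
def Pre_majority_bundle (vectors : List (List Int)) : Prop :=
  ∀ v ∈ vectors, (vectors.headD []).length ≤ v.length
instance (vectors : List (List Int)) : Decidable (Pre_majority_bundle vectors) := by
  unfold Pre_majority_bundle; infer_instance
def pvWitness_majority_bundle : List (List Int) := [[1, 0, 1], [0, 0, 1], [1, 1, 1]]

def Spec_majority_bundle (vectors : List (List Int)) (out : Option (List Int)) : Prop := out = majority_bundle_alt vectors
instance (vectors : List (List Int)) (out : Option (List Int)) : Decidable (Spec_majority_bundle vectors out) := by unfold Spec_majority_bundle; infer_instance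

-- ===== CLAIM (what is proved, stated in full; the proofs are below) =====
def Claim_equal_majority_bundle : Prop := ∀ (vectors : List (List Int)), Dom_majority_bundle vectors → Pre_majority_bundle vectors → Spec_majority_bundle vectors (majority_bundle vectors)

-- ===== LEMMAS AND PROOFS =====

-- A's append-singleton loop is a map over the range.
theorem pv_foldl_app (l : List Int) (f : Int → Int) (acc : List Int) :
    l.foldl (fun r i => r ++ [f i]) acc = acc ++ l.map f := by
  induction l generalizing acc with
  | nil => simp
  | cons x t ih => simp [ih]

-- A's running count is the sum of the per-vector entries.
theorem pv_foldl_sum (vs : List (List Int)) (g : List Int → Int) (a : Int) :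
    vs.foldl (fun s v => s + g v) a = a + (vs.map g).sum := by
  induction vs generalizing a with
  | nil => simp
  | cons v t ih => simp only [List.foldl_cons, List.map_cons, List.sum_cons]; rw [ih]; ring

-- Characterisation of the tree reduction: its length is bounded by every member's
-- length, reaches any common lower bound, and each entry is the column sum.
theorem pvVSum_char (vs : List (List Int)) : vs ≠ [] →
    (∀ v ∈ vs, (pvVSum vs).length ≤ v.length)
  ∧ (∀ L : ℕ, (∀ v ∈ vs, L ≤ v.length) → L ≤ (pvVSum vs).length)
  ∧ (∀ (i : ℕ) (h : i < (pvVSum vs).length),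
      (pvVSum vs)[i] = (vs.map (fun v => PySem.List.pyGetD v (i : Int) 0)).sum) := by
  induction vs using pvVSum.induct with
  | case1 => exact fun hne => absurd rfl hne
  | case2 v =>
    intro _
    refine ⟨by simp [pvVSum], by intro L h; simpa [pvVSum] using h v (by simp), ?_⟩
    intro i h
    simp only [pvVSum] at h ⊢
    rw [List.map_cons, List.map_nil, List.sum_cons, List.sum_nil,
      PySem.List.pyGetD_eq_getElem v 0 (by positivity) (by simpa using h)]
    simp
  | case3 a b rest vsh midh ih1 ih2 =>
    intro _
    simp only [midh, vsh] at ih1 ih2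
    have hlen : 2 ≤ (a :: b :: rest).length := by simp
    set vs' := a :: b :: rest with hvs
    set mid := vs'.length / 2 with hmid
    have hm1 : 1 ≤ mid := by omega
    have hm2 : mid < vs'.length := by omega
    have htne : vs'.take mid ≠ [] := by
      intro hc; have := congrArg List.length hc
      simp [List.length_take] at this; omega
    have hdne : vs'.drop mid ≠ [] := by
      intro hc; have := congrArg List.length hc
      simp at this; omega
    obtain ⟨t1, t2, t3⟩ := ih1 htne
    obtain ⟨d1, d2, d3⟩ := ih2 hdne
    have heq : pvVSum vs' =
        (pvVSum (vs'.take mid)).zipWith (fun x y => x + y) (pvVSum (vs'.drop mid)) := by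
      rw [hvs]; rw [pvVSum]
    have hlenz : (pvVSum vs').length =
        min (pvVSum (vs'.take mid)).length (pvVSum (vs'.drop mid)).length := by
      rw [heq, List.length_zipWith]
    refine ⟨?_, ?_, ?_⟩
    · intro v hv
      rcases (by rw [← List.take_append_drop mid vs'] at hv; exact List.mem_append.mp hv :
          v ∈ vs'.take mid ∨ v ∈ vs'.drop mid) with h | h
      · exact le_trans (by omega : (pvVSum vs').length ≤ (pvVSum (vs'.take mid)).length) (t1 v h)
      · exact le_trans (by omega : (pvVSum vs').length ≤ (pvVSum (vs'.drop mid)).length) (d1 v h)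
    · intro L hL
      have h1 := t2 L (fun v hv => hL v (List.mem_of_mem_take hv))
      have h2 := d2 L (fun v hv => hL v (List.mem_of_mem_drop hv))
      omega
    · intro i h
      have hi1 : i < (pvVSum (vs'.take mid)).length := by omega
      have hi2 : i < (pvVSum (vs'.drop mid)).length := by omega
      have : (pvVSum vs')[i]'h =
          ((pvVSum (vs'.take mid)).zipWith (fun x y => x + y) (pvVSum (vs'.drop mid)))[i]'(by
            rw [← heq]; exact h) := by
        congr 1
      rw [this, List.getElem_zipWith, t3 i hi1, d3 i hi2]
      conv_rhs => rw [← List.take_append_drop mid vs']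
      rw [List.map_append, List.sum_append]

-- ===== VERDICT (by name: the statement is the Claim_ definition above) =====
theorem majority_bundle_spec : Claim_equal_majority_bundle := by
  intro vectors _ hpre
  unfold Spec_majority_bundle majority_bundle majority_bundle_alt
  simp only []
  by_cases h0 : vectors.length = 0
  · simp [h0]
  · by_cases h1 : vectors.length = 1
    · simp [h1]
    · simp only [h0, h1, if_false]
      congr 1
      have hne : vectors ≠ [] := by intro h; rw [h] at h0; exact h0 rfl
      have hhead : vectors.headD [] ∈ vectors := by
        cases vectors with
        | nil => exact absurd rfl hne
        | cons w ws => simp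
      obtain ⟨c1, c2, c3⟩ := pvVSum_char vectors hne
      have hlen : (pvVSum vectors).length = (vectors.headD []).length :=
        le_antisymm (c1 _ hhead) (c2 _ hpre)
      rw [pv_foldl_app, List.nil_append]
      apply List.ext_getElem
      · simp [PySem.List.length_pyRange_one, hlen]
      · intro i hA hB
        have hiv : i < (pvVSum vectors).length := by
          simpa using hB
        rw [List.getElem_map, List.getElem_map, PySem.List.getElem_pyRange_one]
        rw [c3 i hiv]
        rw [pv_foldl_sum]
        norm_num
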